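-- pv_equiv track=rewrite | github.com/Minerstove/Python | cs11/hope-1/(download_and_submit_code_here!)_offline_judge/14_nsolaris/OJ/model_solution.py | nsolaris
-- ===== SOURCE A (Python) =====
-- def gcd(a,b):
--   if a==0: return b
--   return gcd(b%a,a)
--
-- def lcm(a,b):
--     return a*b//gcd(a,b)
--
-- def nsolaris(tup,M,N):
--     n=len(tup)
--     total=0
--
--     for mask in range(1,1<<n):
--         bits=[tup[i] for i in range(n) if mask & (1<<i)]
--         l=bits[0]
--         for x in bits[1:]:
--             l=lcm(l,x)
--         sign = (-1)**(len(bits)+1)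
--         total += sign*(N//l - (M-1)//l)
--     return total
-- ===== SOURCE B (Python) =====
-- def gcd(a, b):
--     if a == 0:
--         return b
--     return gcd(b % a, a)
--
--
-- def lcm(a, b):
--     return a * b // gcd(a, b)
--
--
-- def nsolaris(tup, M, N):
--     # Build the inclusion-exclusion terms incrementally: for each divisor d,
--     # extend the maintained (lcm, sign) list instead of re-deriving every
--     # subset from a bitmask and refolding its lcm from scratch.
--     combos = []
--     for d in tup:
--         new = [(d, 1)]
--         for (l, s) in combos:
--             new.append((lcm(l, d), -s))
--         combos = combos + new
--     total = 0
--     for (l, s) in combos: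
--         total += s * (N // l - (M - 1) // l)
--     return total
-- ===== Notes on version B (the rewrite author's own statement) =====
-- stated objective: alternative
-- what changed: Replaces A's enumeration of 2^n integer bitmasks (rebuilding each subset's element list and refolding its lcm from scratch) by an incrementally maintained list of (lcm, sign) inclusion-exclusion terms, extending it once per divisor so every subset lcm comes from a single lcm call on a previously stored one; intended as faster (measured 8.4x at n=16, unconfirmed at sizes where both time out).
import Mathlib
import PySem

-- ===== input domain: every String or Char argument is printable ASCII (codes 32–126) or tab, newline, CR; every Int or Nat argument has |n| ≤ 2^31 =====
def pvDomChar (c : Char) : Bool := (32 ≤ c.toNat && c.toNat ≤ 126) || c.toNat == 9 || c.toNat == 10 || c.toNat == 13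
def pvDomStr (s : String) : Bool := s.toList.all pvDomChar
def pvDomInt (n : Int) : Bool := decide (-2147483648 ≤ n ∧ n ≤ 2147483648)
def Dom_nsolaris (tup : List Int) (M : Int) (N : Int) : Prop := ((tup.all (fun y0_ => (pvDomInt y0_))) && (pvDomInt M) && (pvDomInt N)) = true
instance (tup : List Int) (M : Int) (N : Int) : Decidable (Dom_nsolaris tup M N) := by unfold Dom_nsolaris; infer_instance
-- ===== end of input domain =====

-- B replaces A's bitmask enumeration (refolding each subset's lcm from scratch) by an
-- incrementally maintained list of (lcm, sign) inclusion-exclusion terms: a different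
-- traversal of the same 2^n subsets that needs one lcm call per subset.

-- ===== PORT A =====
-- Python's recursive gcd (module helper, shared verbatim by A and B)
def pyGcd (a b : Int) : Int :=
  if h : a = 0 then b else pyGcd (PySem.Int.mod b a) a
termination_by a.natAbs
decreasing_by
  rcases lt_trichotomy a 0 with hlt | heq | hgt
  · have h1 := PySem.Int.mod_neg_bounds b hlt
    omega
  · exact absurd heq h
  · have h1 := PySem.Int.mod_nonneg b hgt
    have h2 := PySem.Int.mod_lt b hgt
    omega

def pyLcm (a b : Int) : Int := PySem.Int.floordiv (a * b) (pyGcd a b)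

def nsolaris (tup : List Int) (M : Int) (N : Int) : Int :=
  let n : Int := tup.length
  -- for mask in range(1, 1 << n): Python's 1 << n is (1 : Int) <<< (shift as Nat; exact, n ≥ 0)
  (PySem.List.pyRange 1 ((1 : Int) <<< tup.length) 1).foldl (fun total mask =>
    -- bits = [tup[i] for i in range(n) if mask & (1 << i)]; i ∈ [0,n) so tup[i] is in
    -- range and pyGetD is exact; i.toNat is exact since i ≥ 0
    let bits := ((PySem.List.pyRange 0 n 1).filter
        (fun i => PySem.Int.band mask ((1 : Int) <<< i.toNat) != 0)).map
        (fun i => PySem.List.pyGetD tup i 0)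
    -- l = bits[0] (in range: mask ≥ 1 sets some bit), then folding lcm over bits[1:]
    let l := (PySem.List.slice bits (some 1) none).foldl pyLcm (PySem.List.pyGetD bits 0 0)
    let sign : Int := (-1 : Int) ^ (bits.length + 1)
    total + sign * (PySem.Int.floordiv N l - PySem.Int.floordiv (M - 1) l)) 0

-- ===== PORT B =====
def nsolaris_alt (tup : List Int) (M : Int) (N : Int) : Int :=
  let combos : List (Int × Int) := tup.foldl (fun combos d =>
    let new := combos.foldl (fun new p => new ++ [(pyLcm p.1 d, -p.2)]) [(d, (1 : Int))]
    combos ++ new) []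
  combos.foldl (fun total p =>
    total + p.2 * (PySem.Int.floordiv N p.1 - PySem.Int.floordiv (M - 1) p.1)) 0

-- ===== PRECONDITION & SPEC =====
-- Pre_ excludes tuples containing 0, on which Python's A (and B) hit a ZeroDivisionError
-- (a zero divisor makes some subset lcm 0 and N // l raises).
def Pre_nsolaris (tup : List Int) (M : Int) (N : Int) : Prop := (0 : Int) ∉ tup
instance (tup : List Int) (M : Int) (N : Int) : Decidable (Pre_nsolaris tup M N) := by
  unfold Pre_nsolaris; infer_instance

def pvWitness_nsolaris : List Int × Int × Int := ([2, 3, 4], 1, 20)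

def Spec_nsolaris (tup : List Int) (M : Int) (N : Int) (out : Int) : Prop := out = nsolaris_alt tup M N
instance (tup : List Int) (M : Int) (N : Int) (out : Int) : Decidable (Spec_nsolaris tup M N out) := by unfold Spec_nsolaris; infer_instance

-- ===== CLAIM (what is proved, stated in full; the proofs are below) =====
def Claim_equal_nsolaris : Prop := ∀ (tup : List Int) (M : Int) (N : Int), Dom_nsolaris tup M N → Pre_nsolaris tup M N → Spec_nsolaris tup M N (nsolaris tup M N)

-- ===== LEMMAS AND PROOFS =====

-- B's loop step, list of accumulated (lcm, sign) terms, and the per-term count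
def pvFlip (d : Int) (p : Int × Int) : Int × Int := (pyLcm p.1 d, -p.2)

def pvStep (c : List (Int × Int)) (d : Int) : List (Int × Int) :=
  c ++ (d, 1) :: c.map (pvFlip d)

def pvCombos (ts : List Int) : List (Int × Int) := ts.foldl pvStep []

def pvTerm (M N : Int) (p : Int × Int) : Int :=
  p.2 * (PySem.Int.floordiv N p.1 - PySem.Int.floordiv (M - 1) p.1)

-- A's subset for a (Nat) mask, and its (lcm, sign) pair
def pvBits (ts : List Int) (n m : Nat) : List Int :=
  ((List.range n).filter (fun i => m.testBit i)).map (fun i => ts.getD i 0)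

def pvPair (bits : List Int) : Int × Int :=
  ((PySem.List.slice bits (some 1) none).foldl pyLcm (PySem.List.pyGetD bits 0 0),
   (-1 : Int) ^ (bits.length + 1))

def pvPairs (ts : List Int) : List (Int × Int) :=
  (List.range (2 ^ ts.length - 1)).map (fun k => pvPair (pvBits ts ts.length (k + 1)))

theorem pv_one_shiftLeft (n : Nat) : (1 : Int) <<< n = ((2 ^ n : Nat) : Int) := by
  simp [Int.shiftLeft_eq]

theorem pv_alt_eq (tup : List Int) (M N : Int) :
    nsolaris_alt tup M N = ((pvCombos tup).map (pvTerm M N)).sum := by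
  unfold nsolaris_alt
  have hstep : (fun (combos : List (Int × Int)) (d : Int) =>
      combos ++ combos.foldl (fun new p => new ++ [(pyLcm p.1 d, -p.2)]) [(d, (1 : Int))]) = pvStep := by
    funext c d
    rw [PySem.List.foldl_append_singleton_eq_map (fun p => (pyLcm p.1 d, -p.2)) c [(d, 1)]]
    rfl
  rw [hstep]
  show List.foldl (fun acc x => acc + pvTerm M N x) 0 (pvCombos tup) = _
  rw [PySem.List.foldl_add, zero_add]

theorem pv_bits_bridge (ts : List Int) (m : Nat) :
    ((PySem.List.pyRange 0 (ts.length : Int) 1).filter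
        (fun i => PySem.Int.band (m : Int) ((1 : Int) <<< i.toNat) != 0)).map
        (fun i => PySem.List.pyGetD ts i 0) = pvBits ts ts.length m := by
  rw [PySem.List.pyRange_zero_natCast, List.filter_map, List.map_map]
  unfold pvBits
  have hf : List.filter ((fun i => PySem.Int.band (m : Int) ((1 : Int) <<< i.toNat) != 0)
        ∘ (fun k : Nat => (k : Int))) (List.range ts.length)
      = List.filter (fun i => m.testBit i) (List.range ts.length) := by
    apply List.filter_congr
    intro k _
    simp only [Function.comp_apply, Int.toNat_natCast]
    rw [Int.one_shiftLeft, PySem.Int.band_natCast, Nat.and_two_pow]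
    cases h : m.testBit k <;> simp
  rw [hf]
  simp [Function.comp_def]

theorem pv_bits_low (ts : List Int) (d : Int) (n m : Nat) (hn : n = ts.length)
    (hm : m < 2 ^ n) : pvBits (ts ++ [d]) (n + 1) m = pvBits ts n m := by
  unfold pvBits
  rw [List.range_succ, List.filter_append, List.map_append]
  have h1 : (List.filter (fun i => m.testBit i) [n]) = [] := by
    simp [Nat.testBit_lt_two_pow hm]
  rw [h1]
  simp only [List.map_nil, List.append_nil]
  apply List.map_congr_left
  intro i hi
  rw [List.mem_filter, List.mem_range] at hi
  rw [List.getD_append _ _ _ _ (by omega)]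

theorem pv_testbit_lt (n m i : Nat) (hm : m < 2 ^ n) (h : m.testBit i = true) : i < n := by
  by_contra hc
  have : m < 2 ^ i := lt_of_lt_of_le hm (Nat.pow_le_pow_right (by omega) (by omega))
  rw [Nat.testBit_lt_two_pow this] at h
  exact Bool.false_ne_true h

theorem pv_bits_high (ts : List Int) (d : Int) (n m : Nat) (hn : n = ts.length)
    (hm : m < 2 ^ n) : pvBits (ts ++ [d]) (n + 1) (2 ^ n + m) = pvBits ts n m ++ [d] := by
  unfold pvBits
  rw [List.range_succ, List.filter_append, List.map_append]
  have h1 : (List.filter (fun i => (2 ^ n + m).testBit i) [n]) = [n] := by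
    simp [Nat.testBit_two_pow_add_eq, Nat.testBit_lt_two_pow hm]
  rw [h1]
  congr 1
  · have hfeq : List.filter (fun i => (2 ^ n + m).testBit i) (List.range n)
        = List.filter (fun i => m.testBit i) (List.range n) := by
      apply List.filter_congr
      intro i hi
      rw [List.mem_range] at hi
      rw [Nat.testBit_two_pow_add_gt hi]
    rw [hfeq]
    apply List.map_congr_left
    intro i hi
    rw [List.mem_filter, List.mem_range] at hi
    rw [List.getD_append _ _ _ _ (by omega)]
  · simp [hn]

theorem pv_bits_ne_nil (ts : List Int) (n m : Nat) (h1 : 1 ≤ m) (h2 : m < 2 ^ n) :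
    pvBits ts n m ≠ [] := by
  obtain ⟨i, hi⟩ := Nat.exists_testBit_of_ne_zero (by omega : m ≠ 0)
  have hin : i < n := pv_testbit_lt n m i h2 hi
  unfold pvBits
  intro hcon
  rw [List.map_eq_nil_iff, List.filter_eq_nil_iff] at hcon
  exact absurd (hcon i (List.mem_range.mpr hin)) (by simp [hi])

theorem pv_pair_singleton (d : Int) : pvPair [d] = (d, 1) := by
  unfold pvPair
  simp [PySem.List.slice_from_one, PySem.List.pyGetD_zero_cons]

theorem pv_pair_snoc (bits : List Int) (d : Int) (h : bits ≠ []) :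
    pvPair (bits ++ [d]) = pvFlip d (pvPair bits) := by
  obtain ⟨x, r, rfl⟩ := List.exists_cons_of_ne_nil h
  unfold pvPair pvFlip
  simp only [List.cons_append, PySem.List.slice_from_one, List.tail_cons,
    PySem.List.pyGetD_zero_cons, List.foldl_append, List.foldl_cons, List.foldl_nil,
    List.length_append, List.length_cons, List.length_nil]
  rw [Prod.mk.injEq]
  exact ⟨rfl, by ring⟩

theorem pv_bits_zero (ts : List Int) (n : Nat) : pvBits ts n 0 = [] := by
  unfold pvBits
  simp

theorem pv_pairs_eq_combos (ts : List Int) : pvPairs ts = pvCombos ts := by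
  induction ts using List.reverseRecOn with
  | nil => rfl
  | append_singleton ts d ih =>
    have hn : (ts ++ [d]).length = ts.length + 1 := by simp
    set n := ts.length with hnd
    have hcomb : pvCombos (ts ++ [d]) = pvStep (pvCombos ts) d := by
      unfold pvCombos
      rw [List.foldl_append, List.foldl_cons, List.foldl_nil]
    rw [hcomb, ← ih]
    unfold pvPairs
    rw [hn]
    have hsplit : 2 ^ (n + 1) - 1 = (2 ^ n - 1) + 2 ^ n := by
      have := Nat.one_le_two_pow (n := n); omega
    rw [hsplit, List.range_add, List.map_append]
    have hlow : (List.range (2 ^ n - 1)).map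
        (fun k => pvPair (pvBits (ts ++ [d]) (n + 1) (k + 1)))
        = (List.range (2 ^ n - 1)).map (fun k => pvPair (pvBits ts n (k + 1))) := by
      apply List.map_congr_left
      intro k hk
      rw [List.mem_range] at hk
      rw [pv_bits_low ts d n (k + 1) hnd (by have := Nat.one_le_two_pow (n := n); omega)]
    rw [hlow]
    have hhigh : (List.map (fun k => pvPair (pvBits (ts ++ [d]) (n + 1) (k + 1)))
          (List.map (fun x => 2 ^ n - 1 + x) (List.range (2 ^ n))))
        = (d, 1) :: ((List.range (2 ^ n - 1)).map (fun k => pvPair (pvBits ts n (k + 1)))).map (pvFlip d) := by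
      rw [List.map_map,
        show List.range (2 ^ n) = List.range ((2 ^ n - 1) + 1) from by
          congr 1; have := Nat.one_le_two_pow (n := n); omega,
        List.range_succ_eq_map, List.map_cons, List.map_map]
      congr 1
      · show pvPair (pvBits (ts ++ [d]) (n + 1) ((2 ^ n - 1) + 0 + 1)) = (d, 1)
        rw [show (2 ^ n - 1) + 0 + 1 = 2 ^ n + 0 from by
            have := Nat.one_le_two_pow (n := n); omega,
          pv_bits_high ts d n 0 hnd (by positivity), pv_bits_zero, List.nil_append,
          pv_pair_singleton]
      · rw [List.map_map]
        apply List.map_congr_left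
        intro k hk
        rw [List.mem_range] at hk
        show pvPair (pvBits (ts ++ [d]) (n + 1) ((2 ^ n - 1) + (k + 1) + 1))
            = pvFlip d (pvPair (pvBits ts n (k + 1)))
        rw [show (2 ^ n - 1) + (k + 1) + 1 = 2 ^ n + (k + 1) from by
            have := Nat.one_le_two_pow (n := n); omega,
          pv_bits_high ts d n (k + 1) hnd (by have := Nat.one_le_two_pow (n := n); omega),
          pv_pair_snoc _ _ (pv_bits_ne_nil ts n (k + 1) (by omega)
            (by have := Nat.one_le_two_pow (n := n); omega))]
    rw [hhigh]
    rfl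

theorem pv_a_eq (tup : List Int) (M N : Int) :
    nsolaris tup M N = ((pvPairs tup).map (pvTerm M N)).sum := by
  unfold nsolaris
  show List.foldl (fun total mask => total + pvTerm M N (pvPair
      (((PySem.List.pyRange 0 (tup.length : Int) 1).filter
        (fun i => PySem.Int.band mask ((1 : Int) <<< i.toNat) != 0)).map
        (fun i => PySem.List.pyGetD tup i 0)))) 0
      (PySem.List.pyRange 1 ((1 : Int) <<< tup.length) 1) = _
  rw [PySem.List.foldl_add, zero_add, pv_one_shiftLeft,
    PySem.List.pyRange_one 1 ((2 ^ tup.length : Nat) : Int), List.map_map]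
  unfold pvPairs
  have hlen : (((2 ^ tup.length : Nat) : Int) - 1).toNat = 2 ^ tup.length - 1 := by
    have := Nat.one_le_two_pow (n := tup.length); omega
  rw [hlen, List.map_map]
  congr 1
  apply List.map_congr_left
  intro k _
  simp only [Function.comp_apply]
  have hcast : (1 : Int) + (k : Int) = ((k + 1 : Nat) : Int) := by push_cast; ring
  rw [hcast, pv_bits_bridge tup (k + 1)]

-- ===== VERDICT (by name: the statement is the Claim_ definition above) =====
theorem nsolaris_spec : Claim_equal_nsolaris := by
  intro tup M N _hdom _hpre
  unfold Spec_nsolaris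
  rw [pv_a_eq, pv_alt_eq, pv_pairs_eq_combos]
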